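-- pv_equiv track=rewrite | github.com/Harsha2sai/Maya-One | Agent/providers/sttprovider.py | is_deepgram_connection_error
-- ===== SOURCE A (Python) =====
-- from typing import Any, Optional, Dict
--
-- def is_deepgram_connection_error(err: Any) -> bool:
--     """Heuristic matcher for Deepgram connectivity/runtime stream failures."""
--     text = str(err or "").lower()
--     markers = (
--         "api.deepgram.com",
--         "failed to connect to deepgram",
--         "failed to recognize speech after",
--         "clientconnectordnserror",
--         "name or service not known",
--         "temporary failure in name resolution",
--         "net0001",
--         "cannot write to closing transport",
--         "connection closed unexpectedly",
--     )
--     return any(marker in text for marker in markers)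
-- ===== SOURCE B (Python) =====
-- def is_deepgram_connection_error(err) -> bool:
--     """Single left-to-right scan: at each position test the markers as prefixes."""
--     text = str(err or "").lower()
--     markers = (
--         "api.deepgram.com",
--         "failed to connect to deepgram",
--         "failed to recognize speech after",
--         "clientconnectordnserror",
--         "name or service not known",
--         "temporary failure in name resolution",
--         "net0001",
--         "cannot write to closing transport",
--         "connection closed unexpectedly",
--     )
--     for i in range(len(text) + 1):
--         for marker in markers:
--             if text.startswith(marker, i):
--                 return True
--     return False
-- ===== Notes on version B (the rewrite author's own statement) =====
-- stated objective: alternative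
-- what changed: A tests each marker with a separate substring search over the text; B makes one left-to-right pass over the text positions and at each position tests all markers as prefixes (the automaton-style traversal a regex alternation would do).
import Mathlib
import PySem

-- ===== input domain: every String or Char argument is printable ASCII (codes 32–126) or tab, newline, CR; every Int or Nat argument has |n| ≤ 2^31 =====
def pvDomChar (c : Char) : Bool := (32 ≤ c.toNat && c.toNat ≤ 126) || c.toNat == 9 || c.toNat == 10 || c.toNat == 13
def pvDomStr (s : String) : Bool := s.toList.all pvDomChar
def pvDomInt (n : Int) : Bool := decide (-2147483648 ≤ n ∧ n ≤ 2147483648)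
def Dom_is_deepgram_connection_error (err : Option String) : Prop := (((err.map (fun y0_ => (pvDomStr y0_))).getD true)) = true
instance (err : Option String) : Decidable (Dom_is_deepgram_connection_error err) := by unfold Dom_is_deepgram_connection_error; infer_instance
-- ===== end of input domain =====

-- ===== PORT A =====
-- Header: B replaces A's per-marker substring searches by one left-to-right scan of the
-- text testing all markers as prefixes at each position (alternative decomposition, same cost).
-- Port of A: text = str(err or "").lower(); any(marker in text for marker in markers).
-- str(err or "") is err's string if present, "" otherwise (some "" is falsy and also gives "").
def pvMarkers : List String :=
  ["api.deepgram.com",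
   "failed to connect to deepgram",
   "failed to recognize speech after",
   "clientconnectordnserror",
   "name or service not known",
   "temporary failure in name resolution",
   "net0001",
   "cannot write to closing transport",
   "connection closed unexpectedly"]

def is_deepgram_connection_error (err : Option String) : Bool :=
  let text := PySem.Str.lower (err.getD "")
  pvMarkers.any (fun marker => PySem.Str.isIn marker text)

-- ===== PORT B =====
-- Port of Source B's loop 'for i in range(len(text)+1): for marker in markers: if text.startswith(marker, i)':
-- text.startswith(marker, i) is exactly marker.toList <+: (text.toList.drop i), so the index loop
-- becomes structural recursion over the successive suffixes of text.toList (one step per i).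
def pvScan (markers : List (List Char)) : List Char → Bool
  | [] => markers.any (fun m => m.isPrefixOf [])
  | c :: t => markers.any (fun m => m.isPrefixOf (c :: t)) || pvScan markers t

def is_deepgram_connection_error_alt (err : Option String) : Bool :=
  let text := PySem.Str.lower (err.getD "")
  pvScan (pvMarkers.map String.toList) text.toList

-- ===== PRECONDITION & SPEC =====
def Spec_is_deepgram_connection_error (err : Option String) (out : Bool) : Prop := out = is_deepgram_connection_error_alt err
instance (err : Option String) (out : Bool) : Decidable (Spec_is_deepgram_connection_error err out) := by unfold Spec_is_deepgram_connection_error; infer_instance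

-- ===== CLAIM (what is proved, stated in full; the proofs are below) =====
def Claim_equal_is_deepgram_connection_error : Prop := ∀ (err : Option String), Dom_is_deepgram_connection_error err → Spec_is_deepgram_connection_error err (is_deepgram_connection_error err)

-- ===== LEMMAS AND PROOFS =====

-- pvScan finds a marker iff some marker is an infix of the text.
theorem pvScan_eq_true_iff (markers : List (List Char)) (s : List Char) :
    pvScan markers s = true ↔ ∃ m ∈ markers, m <:+: s := by
  induction s with
  | nil =>
    simp [pvScan, List.any_eq_true, List.isPrefixOf_iff_prefix]
  | cons c t ih =>
    simp [pvScan, List.any_eq_true, List.isPrefixOf_iff_prefix, ih, List.infix_cons_iff]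
    constructor
    · rintro (⟨m, hm, hp⟩ | ⟨m, hm, hi⟩)
      · exact ⟨m, hm, Or.inl hp⟩
      · exact ⟨m, hm, Or.inr hi⟩
    · rintro ⟨m, hm, hp | hi⟩
      · exact Or.inl ⟨m, hm, hp⟩
      · exact Or.inr ⟨m, hm, hi⟩

-- ===== VERDICT (by name: the statement is the Claim_ definition above) =====
theorem is_deepgram_connection_error_spec : Claim_equal_is_deepgram_connection_error := by
  intro err _
  unfold Spec_is_deepgram_connection_error
  unfold is_deepgram_connection_error is_deepgram_connection_error_alt
  apply Bool.eq_iff_iff.mpr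
  rw [pvScan_eq_true_iff]
  simp [List.any_eq_true, PySem.Chars.isIn_iff_infix]
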